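-- pv_equiv track=rewrite | github.com/4D4J/JsonAssist | JsonAssits.py | dict_to_json_string
-- ===== SOURCE A (Python) =====
-- def dict_to_json_string(data, indent=4):
--     items = []
--     for key, value in data.items():
--         if isinstance(value, str):
--             value_str = f'"{value}"'
--         elif isinstance(value, dict):
--             value_str = dict_to_json_string(value, indent)
--         else:
--             value_str = str(value)
--         items.append(f'"{key}": {value_str}')
--     items_str = ",\n".join(items)
--     return "{\n" + " " * indent + items_str.replace("\n", "\n" + " " * indent) + "\n}"
-- ===== SOURCE B (Python) =====
-- def dict_to_json_string(data, indent=4):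
--     pad = " " * indent
--     lines = []
--     for key, value in data.items():
--         if isinstance(value, str):
--             value_str = f'"{value}"'
--         elif isinstance(value, dict):
--             value_str = dict_to_json_string(value, indent)
--         else:
--             value_str = str(value)
--         entry_lines = f'"{key}": {value_str}'.split("\n")
--         if lines:
--             lines[-1] += ","
--         lines.extend(entry_lines)
--     return "\n".join(["{"] + [pad + line for line in lines] + ["}"])
-- ===== Notes on version B (the rewrite author's own statement) =====
-- stated objective: alternative
-- what changed: B formats line by line - each entry is split into lines, a comma is appended to the previous line, and every body line is indented once when the lines are joined - instead of A's join-then-whole-string-replace re-indent.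
-- intended difference: On an empty dict A returns '{\n' + indent spaces + '\n}' with a whitespace-only line left over from joining zero items, while B returns '{\n}'; a line of bare indentation spaces serves no purpose, so B's output is the intended one. — e.g. on dict_to_json_string([], 4): A returns "{\n \n}", B returns "{\n}"
import Mathlib
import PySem

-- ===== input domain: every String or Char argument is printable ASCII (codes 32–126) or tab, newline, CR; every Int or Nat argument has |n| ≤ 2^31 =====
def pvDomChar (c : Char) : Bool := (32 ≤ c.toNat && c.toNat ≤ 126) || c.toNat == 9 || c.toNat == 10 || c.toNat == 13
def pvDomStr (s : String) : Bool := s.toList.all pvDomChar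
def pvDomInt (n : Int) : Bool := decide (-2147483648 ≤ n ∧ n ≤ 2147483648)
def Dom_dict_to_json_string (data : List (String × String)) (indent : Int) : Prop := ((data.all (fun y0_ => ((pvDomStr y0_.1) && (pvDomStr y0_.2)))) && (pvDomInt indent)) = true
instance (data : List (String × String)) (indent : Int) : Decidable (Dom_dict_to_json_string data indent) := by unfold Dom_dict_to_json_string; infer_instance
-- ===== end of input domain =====

-- B formats line by line (split each entry into lines, append the comma to the previous
-- line, indent each body line once at the final join) instead of A's join + whole-string
-- replace re-indent; same cost class, different structure.

-- ===== PORT A =====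
-- values are typed str here (dict[str,str]), so A's `isinstance(value, str)` branch is the one taken
def dict_to_json_string (data : List (String × String)) (indent : Int) : String :=
  let items := data.foldl (fun items kv =>
    let value_str := "\"" ++ kv.2 ++ "\""
    items ++ ["\"" ++ kv.1 ++ "\": " ++ value_str]) ([] : List String)
  let items_str := PySem.Str.join ",\n" items
  let pad := String.ofList (PySem.List.pyRepeat [' '] indent)   -- " " * indent
  "{\n" ++ pad ++ PySem.Str.replace items_str "\n" ("\n" ++ pad) ++ "\n}"

-- ===== PORT B =====
-- values are typed str here, so B's `isinstance(value, str)` branch is the one taken;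
-- `.split("\n")` (nonempty literal separator) is PySem.Chars.splitOn, exact for sep ≠ ""
def dict_to_json_string_alt (data : List (String × String)) (indent : Int) : String :=
  let pad := String.ofList (PySem.List.pyRepeat [' '] indent)   -- " " * indent
  let lines := data.foldl (fun (lines : List String) kv =>
    let value_str := "\"" ++ kv.2 ++ "\""
    let entry_lines := (PySem.Chars.splitOn ("\"" ++ kv.1 ++ "\": " ++ value_str).toList ['\n']).map String.ofList
    -- `if lines: lines[-1] += ","`
    (if lines.isEmpty then lines else lines.dropLast ++ [lines.getLastD "" ++ ","]) ++ entry_lines)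
    ([] : List String)
  PySem.Str.join "\n" (["{"] ++ lines.map (fun l => pad ++ l) ++ ["}"])

-- ===== PRECONDITION & SPEC =====
-- On an empty dict A returns "{\n" + indent spaces + "\n}" with a whitespace-only line left
-- over from joining zero items, while B returns "{\n}"; a line of bare indentation spaces
-- serves no purpose, so B's output is the intended one.
def D_dict_to_json_string (data : List (String × String)) (indent : Int) : Prop := data = []
instance (data : List (String × String)) (indent : Int) : Decidable (D_dict_to_json_string data indent) := by unfold D_dict_to_json_string; infer_instance
def Spec_dict_to_json_string (data : List (String × String)) (indent : Int) (out : String) : Prop := ¬ D_dict_to_json_string data indent → out = dict_to_json_string_alt data indent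
instance (data : List (String × String)) (indent : Int) (out : String) : Decidable (Spec_dict_to_json_string data indent out) := by unfold Spec_dict_to_json_string; infer_instance
def pvDiffWitness_dict_to_json_string : (List (String × String)) × Int := ([], 4)
def pvDiffWitnessOut_dict_to_json_string : String × String := ("{\n    \n}", "{\n}")

-- ===== CLAIM (what is proved, stated in full; the proofs are below) =====
def Claim_unchanged_dict_to_json_string : Prop := ∀ (data : List (String × String)) (indent : Int), Dom_dict_to_json_string data indent → Spec_dict_to_json_string data indent (dict_to_json_string data indent)
def Claim_changed_dict_to_json_string : Prop := Dom_dict_to_json_string (pvDiffWitness_dict_to_json_string.1) (pvDiffWitness_dict_to_json_string.2) ∧ D_dict_to_json_string (pvDiffWitness_dict_to_json_string.1) (pvDiffWitness_dict_to_json_string.2) ∧ dict_to_json_string (pvDiffWitness_dict_to_json_string.1) (pvDiffWitness_dict_to_json_string.2) = pvDiffWitnessOut_dict_to_json_string.1 ∧ dict_to_json_string_alt (pvDiffWitness_dict_to_json_string.1) (pvDiffWitness_dict_to_json_string.2) = pvDiffWitnessOut_dict_to_json_string.2 ∧ pvDiffWitnessOut_dict_to_json_string.1 ≠ pvDiffW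itnessOut_dict_to_json_string.2
def Claim_exact_dict_to_json_string : Prop := ∀ (data : List (String × String)) (indent : Int), Dom_dict_to_json_string data indent → D_dict_to_json_string data indent → dict_to_json_string data indent ≠ dict_to_json_string_alt data indent

-- ===== LEMMAS AND PROOFS =====

-- lines of a character list, as (first line, remaining lines)
def pvLines : List Char → List Char × List (List Char)
  | [] => ([], [])
  | c :: t =>
      let p := pvLines t
      if c = '\n' then ([], p.1 :: p.2) else (c :: p.1, p.2)

-- flat list of lines
def pvLs (s : List Char) : List (List Char) := (pvLines s).1 :: (pvLines s).2

theorem pvLines_cons (c : Char) (t : List Char) :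
    pvLines (c :: t)
      = if c = '\n' then ([], (pvLines t).1 :: (pvLines t).2)
        else (c :: (pvLines t).1, (pvLines t).2) := rfl

theorem pv_split_go (s : List Char) :
    ∀ (fuel : Nat) (cur : List Char) (acc : List (List Char)), s.length ≤ fuel →
      PySem.Chars.splitOn.go ['\n'] fuel s cur acc
        = acc.reverse ++ (cur.reverse ++ (pvLines s).1) :: (pvLines s).2 := by
  induction s with
  | nil =>
    intro fuel cur acc _
    cases fuel <;> simp [PySem.Chars.splitOn.go, pvLines]
  | cons c t ih =>
    intro fuel cur acc hle
    cases fuel with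
    | zero => simp at hle
    | succ fuel =>
      simp only [PySem.Chars.splitOn.go]
      by_cases hc : c = '\n'
      · subst hc
        have hpre : List.isPrefixOf ['\n'] ('\n' :: t) = true := by simp [List.isPrefixOf]
        simp only [hpre, if_pos, List.length_cons] at *
        rw [show List.drop ([].length + 1) ('\n' :: t) = t from by simp]
        rw [ih fuel [] (cur.reverse :: acc) (by omega)]
        simp [pvLines_cons]
      · have hpre : List.isPrefixOf ['\n'] (c :: t) = false := by
          simp [List.isPrefixOf]; exact fun h => absurd h.symm hc
        simp only [hpre] at *
        rw [if_neg (by simp)]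
        rw [ih fuel (c :: cur) acc (by simp at hle; omega)]
        simp [pvLines_cons, hc]

theorem pv_splitOn_newline (s : List Char) :
    PySem.Chars.splitOn s ['\n'] = pvLs s := by
  have := pv_split_go s (s.length + 1) [] [] (by omega)
  simpa [PySem.Chars.splitOn, pvLs] using this

theorem pv_go (x : Char) (new : List Char) :
    ∀ (l : List Char) (fuel : Nat) (acc : List Char), l.length ≤ fuel →
      PySem.Chars.replace.go [x] new fuel l acc
        = acc.reverse ++ l.flatMap (fun c => if c = x then new else [c]) := by
  intro l
  induction l with
  | nil =>
    intro fuel acc _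
    cases fuel <;> simp [PySem.Chars.replace.go]
  | cons c t ih =>
    intro fuel acc hle
    cases fuel with
    | zero => simp at hle
    | succ fuel =>
      simp only [PySem.Chars.replace.go]
      by_cases hc : c = x
      · subst hc
        have hpre : List.isPrefixOf [c] (c :: t) = true := by simp [List.isPrefixOf]
        simp only [hpre, if_pos, List.length_cons] at *
        rw [show List.drop ([].length + 1) (c :: t) = t from by simp]
        rw [ih fuel (new.reverse ++ acc) (by omega)]
        simp
      · have hpre : List.isPrefixOf [x] (c :: t) = false := by
          simp [List.isPrefixOf]; exact fun h => absurd h.symm hc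
        simp only [hpre] at *
        rw [if_neg (by simp)]
        rw [ih fuel (c :: acc) (by simp at hle; omega)]
        simp [hc]

theorem pv_replace_single (s : List Char) (x : Char) (new : List Char) :
    PySem.Chars.replace s [x] new = s.flatMap (fun c => if c = x then new else [c]) := by
  have := pv_go x new s s.length [] le_rfl
  simpa [PySem.Chars.replace] using this

theorem pv_join_ic (sep : List Char) (L : List (List Char)) :
    PySem.Chars.join sep L = List.intercalate sep L := by
  simp [PySem.Chars.join, List.intercalate]

theorem pv_interc_cons (sep x : List Char) (t : List (List Char)) :
    List.intercalate sep (x :: t) = x ++ t.flatMap (fun y => sep ++ y) := by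
  induction t generalizing x with
  | nil => simp [List.intercalate]
  | cons y t ih =>
    have h2 : List.intercalate sep (x::y::t) = x ++ sep ++ List.intercalate sep (y::t) := by
      simp [List.intercalate, List.intersperse]
    rw [h2, ih]
    simp

-- lines of x ++ '\n' :: y = lines of x ++ lines of y
theorem pv_ls_append_newline (x y : List Char) :
    pvLs (x ++ '\n' :: y) = pvLs x ++ pvLs y := by
  induction x with
  | nil => simp [pvLs, pvLines_cons, pvLines]
  | cons c t ih =>
    by_cases hc : c = '\n' <;>
      simp_all [pvLs, pvLines_cons]

-- appending one non-newline character appends it to the last line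
theorem pv_ls_append_char (c : Char) (hc : c ≠ '\n') :
    ∀ s : List Char, pvLs (s ++ [c]) = (pvLs s).dropLast ++ [(pvLs s).getLastD [] ++ [c]] := by
  intro s
  induction s with
  | nil => simp [pvLs, pvLines_cons, pvLines, hc]
  | cons x t ih =>
    rcases h2 : (pvLines t).2 with _ | ⟨q, Q⟩ <;>
      by_cases hx : x = '\n' <;>
      simp_all [pvLs, pvLines_cons, List.getLast?_cons_cons, List.dropLast_cons₂,
        List.append_assoc]

-- the indent lemma: prefixing every line with pad = inserting pad after every newline
theorem pv_indent_lines (pad : List Char) :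
    ∀ s : List Char,
      (pad ++ (pvLines s).1) ++ (pvLines s).2.flatMap (fun y => '\n' :: (pad ++ y))
        = pad ++ s.flatMap (fun c => if c = '\n' then '\n' :: pad else [c]) := by
  intro s
  induction s with
  | nil => simp [pvLines]
  | cons c t ih =>
    by_cases hc : c = '\n'
    · subst hc
      simp only [pvLines_cons, if_pos, List.flatMap_cons] at *
      simp_all
    · have ih' := ih
      rw [List.append_assoc] at ih'
      have h3 := List.append_cancel_left ih'
      simp [pvLines_cons, hc, List.append_assoc, h3]

theorem pv_getLastD_toList (ls : List String) :
    (ls.getLast?.getD "").toList = (Option.map String.toList ls.getLast?).getD [] := by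
  cases h : ls.getLast? <;> simp

-- B's fold invariant: the accumulated lines are the lines of the ",\n"-joined entries so far
theorem pv_fold_lines (rest : List (String × String)) :
    ∀ (ls : List String) (S : List Char), ls.map String.toList = pvLs S →
      ((rest.foldl (fun (lines : List String) kv =>
          (if lines.isEmpty then lines else lines.dropLast ++ [lines.getLastD "" ++ ","]) ++
            (PySem.Chars.splitOn ("\"" ++ kv.1 ++ "\": " ++ ("\"" ++ kv.2 ++ "\"")).toList ['\n']).map String.ofList)
        ls).map String.toList)
      = pvLs (S ++ rest.flatMap (fun kv => ',' :: '\n' :: ("\"" ++ kv.1 ++ "\": " ++ ("\"" ++ kv.2 ++ "\"")).toList)) := by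
  induction rest with
  | nil => intro ls S h; simpa using h
  | cons kv rest ih =>
    intro ls S h
    have hne : ls ≠ [] := by
      intro h0; rw [h0] at h; simp [pvLs] at h
    have hie : ls.isEmpty = false := by simpa [List.isEmpty_iff] using hne
    simp only [List.foldl_cons, hie, Bool.false_eq_true, if_false]
    have hstep : (((ls.dropLast ++ [ls.getLastD "" ++ ","]) ++
        (PySem.Chars.splitOn ("\"" ++ kv.1 ++ "\": " ++ ("\"" ++ kv.2 ++ "\"")).toList ['\n']).map String.ofList).map String.toList)
        = pvLs (S ++ ',' :: '\n' :: ("\"" ++ kv.1 ++ "\": " ++ ("\"" ++ kv.2 ++ "\"")).toList) := by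
      rw [show S ++ ',' :: '\n' :: ("\"" ++ kv.1 ++ "\": " ++ ("\"" ++ kv.2 ++ "\"")).toList
            = (S ++ [',']) ++ '\n' :: ("\"" ++ kv.1 ++ "\": " ++ ("\"" ++ kv.2 ++ "\"")).toList from by simp]
      rw [pv_ls_append_newline, pv_ls_append_char ',' (by decide) S, ← h, pv_splitOn_newline]
      simp [List.map_dropLast, List.map_map, List.append_assoc, Function.comp_def]
      simp [pv_getLastD_toList]
    rw [ih _ _ hstep]
    congr 1
    simp [List.append_assoc]

-- B's whole output at character level, for a line list pvLs T
theorem pv_assemble (pad T : List Char) :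
    List.intercalate ['\n'] (['{'] :: (List.map (fun l => pad ++ l) (pvLs T) ++ [['}']]))
      = ['{', '\n'] ++ pad ++ T.flatMap (fun c => if c = '\n' then '\n' :: pad else [c]) ++ ['\n', '}'] := by
  rw [pv_interc_cons, List.flatMap_append, List.flatMap_map]
  have hi := pv_indent_lines pad T
  simp only [pvLs, List.flatMap_cons, List.flatMap_nil, List.append_nil,
    List.singleton_append] at *
  rw [List.append_assoc] at hi
  have h3 := List.append_cancel_left hi
  simp [List.append_assoc, ← h3]

theorem pv_map_toList_pad (p : String) (L : List String) :
    List.map String.toList (List.map (fun l => p ++ l) L)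
      = List.map (fun l => p.toList ++ l) (List.map String.toList L) := by
  simp [List.map_map, Function.comp_def]

-- ===== VERDICT (by name: the statement is the Claim_ definition above) =====
theorem dict_to_json_string_spec : Claim_unchanged_dict_to_json_string := by
  intro data indent _
  unfold Spec_dict_to_json_string
  intro hD
  cases data with
  | nil => exact (hD (by simp [D_dict_to_json_string])).elim
  | cons kv rest =>
    rw [← String.toList_inj]
    have h0 : (((PySem.Chars.splitOn ("\"" ++ kv.1 ++ "\": " ++ ("\"" ++ kv.2 ++ "\"")).toList ['\n']).map String.ofList).map String.toList)
        = pvLs ("\"" ++ kv.1 ++ "\": " ++ ("\"" ++ kv.2 ++ "\"")).toList := by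
      rw [pv_splitOn_newline]
      simp [List.map_map, Function.comp_def]
    have hls := pv_fold_lines rest _ _ h0
    simp only [dict_to_json_string, dict_to_json_string_alt, List.foldl_cons,
      List.isEmpty_nil, if_pos, List.nil_append,
      PySem.List.foldl_append_eq_flatMap]
    rw [PySem.Str.toList_join]
    simp only [List.map_append, List.map_cons, List.map_nil, List.singleton_append]
    rw [pv_map_toList_pad, hls, pv_join_ic]
    rw [show String.toList "\n" = ['\n'] from rfl, show String.toList "{" = ['{'] from rfl,
        show String.toList "}" = ['}'] from rfl]
    refine Eq.trans ?_ (pv_assemble ((String.ofList (PySem.List.pyRepeat [' '] indent)).toList) _).symm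
    simp [String.toList_append, PySem.Str.toList_replace, pv_replace_single, pv_join_ic,
      pv_interc_cons, List.flatMap_map, List.flatMap_singleton', List.map_flatMap,
      List.flatMap_assoc, List.append_assoc]

theorem dict_to_json_string_changed : Claim_changed_dict_to_json_string := by
  unfold Claim_changed_dict_to_json_string; decide

theorem dict_to_json_string_tight : Claim_exact_dict_to_json_string := by
  intro data indent _ hD h
  have hdata : data = [] := hD
  subst hdata
  have h2 := congrArg (fun s => s.toList.length) h
  simp [dict_to_json_string, dict_to_json_string_alt, PySem.Str.toList_join,
    pv_join_ic, List.intercalate, PySem.Str.toList_replace, pv_replace_single,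
    String.toList_append] at h2
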